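-- pv_equiv track=rewrite | github.com/ayukyo/alltoolkit | Python/midpoint_circle_utils/mod.py | midpoint_circle_iter
-- ===== SOURCE A (Python) =====
-- from typing import List, Tuple, Generator
--
-- def midpoint_circle_iter(radius: int, cx: int = 0, cy: int = 0) -> Generator[Tuple[int, int], None, None]:
--     """
--     中点画圆算法的生成器版本，适用于流式处理或大半径圆形。
--
--     Args:
--         radius: 圆的半径
--         cx: 圆心 X 坐标
--         cy: 圆心 Y 坐标
--
--     Yields:
--         每次迭代产生一个像素坐标元组 (x, y)
--
--     Example:
--         >>> points = list(midpoint_circle_iter(3))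
--         >>> len(points)
--         16
--     """
--     if radius < 0:
--         raise ValueError("半径必须为非负整数")
--
--     if radius == 0:
--         yield (cx, cy)
--         return
--
--     x = 0
--     y = radius
--     d = 1 - radius
--
--     while x <= y:
--         yield (cx + x, cy + y)
--         yield (cx + y, cy + x)
--         yield (cx - x, cy + y)
--         yield (cx - y, cy + x)
--         yield (cx + x, cy - y)
--         yield (cx + y, cy - x)
--         yield (cx - x, cy - y)
--         yield (cx - y, cy - x)
--
--         x += 1
--         if d < 0:
--             d += 2 * x + 1
--         else:
--             y -= 1
--             d += 2 * (x - y) + 1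
-- ===== SOURCE B (Python) =====
-- def midpoint_circle_iter(radius, cx=0, cy=0):
--     if radius < 0:
--         raise ValueError("半径必须为非负整数")
--     if radius == 0:
--         yield (cx, cy)
--         return
--     # pass 1: collect first-octant points only
--     octant = []
--     x, y, d = 0, radius, 1 - radius
--     while x <= y:
--         octant.append((x, y))
--         x += 1
--         if d < 0:
--             d += 2 * x + 1
--         else:
--             y -= 1
--             d += 2 * (x - y) + 1
--     # pass 2: expand each octant point into its eight reflections
--     for x, y in octant:
--         yield (cx + x, cy + y)
--         yield (cx + y, cy + x)
--         yield (cx - x, cy + y)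
--         yield (cx - y, cy + x)
--         yield (cx + x, cy - y)
--         yield (cx + y, cy - x)
--         yield (cx - x, cy - y)
--         yield (cx - y, cy - x)
-- ===== Notes on version B (the rewrite author's own statement) =====
-- stated objective: alternative
-- what changed: B splits A's single yield-everything loop into two passes: a decision loop that only collects the first-octant points into a table, then a separate expansion loop that emits the eight reflections of each table entry.
import Mathlib
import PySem

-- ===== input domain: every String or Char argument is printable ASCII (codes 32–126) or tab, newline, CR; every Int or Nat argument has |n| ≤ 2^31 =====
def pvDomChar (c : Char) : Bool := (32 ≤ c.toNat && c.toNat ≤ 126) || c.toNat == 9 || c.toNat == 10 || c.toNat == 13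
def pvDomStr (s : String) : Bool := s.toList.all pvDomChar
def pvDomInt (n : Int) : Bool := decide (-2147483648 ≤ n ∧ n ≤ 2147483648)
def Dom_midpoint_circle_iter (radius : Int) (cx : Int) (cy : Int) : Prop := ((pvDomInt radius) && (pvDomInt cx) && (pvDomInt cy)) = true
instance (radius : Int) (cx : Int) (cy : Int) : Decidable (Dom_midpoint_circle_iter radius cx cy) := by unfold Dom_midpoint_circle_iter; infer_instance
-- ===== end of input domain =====

-- ===== PORT A =====
-- B separates the octant decision loop from the eightfold symmetry expansion; same order and cost.
-- while x <= y: yield the 8 reflections; then advance (x, y, d) by the midpoint decision rule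
def pvLoopA (cx cy x y d : Int) : List (Int × Int) :=
  if h : x ≤ y then
    (cx + x, cy + y) :: (cx + y, cy + x) :: (cx - x, cy + y) :: (cx - y, cy + x) ::
    (cx + x, cy - y) :: (cx + y, cy - x) :: (cx - x, cy - y) :: (cx - y, cy - x) ::
    (if d < 0 then pvLoopA cx cy (x + 1) y (d + 2 * (x + 1) + 1)
     else pvLoopA cx cy (x + 1) (y - 1) (d + 2 * ((x + 1) - (y - 1)) + 1))
  else []
termination_by (y - x + 1).toNat
decreasing_by all_goals (simp; omega)

def midpoint_circle_iter (radius : Int) (cx : Int) (cy : Int) : List (Int × Int) :=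
  if radius < 0 then []  -- A raises ValueError here; excluded by Pre_
  else if radius = 0 then [(cx, cy)]
  else pvLoopA cx cy 0 radius (1 - radius)

-- ===== PORT B =====
-- pass 1: collect first-octant points only
def pvOctants (x y d : Int) : List (Int × Int) :=
  if h : x ≤ y then
    (x, y) ::
    (if d < 0 then pvOctants (x + 1) y (d + 2 * (x + 1) + 1)
     else pvOctants (x + 1) (y - 1) (d + 2 * ((x + 1) - (y - 1)) + 1))
  else []
termination_by (y - x + 1).toNat
decreasing_by all_goals (simp; omega)

-- pass 2: the eight reflections of one octant point
def pvExpand (cx cy : Int) (p : Int × Int) : List (Int × Int) :=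
  [(cx + p.1, cy + p.2), (cx + p.2, cy + p.1), (cx - p.1, cy + p.2), (cx - p.2, cy + p.1),
   (cx + p.1, cy - p.2), (cx + p.2, cy - p.1), (cx - p.1, cy - p.2), (cx - p.2, cy - p.1)]

def midpoint_circle_iter_alt (radius : Int) (cx : Int) (cy : Int) : List (Int × Int) :=
  if radius < 0 then []  -- B raises ValueError here; excluded by Pre_
  else if radius = 0 then [(cx, cy)]
  else (pvOctants 0 radius (1 - radius)).flatMap (pvExpand cx cy)

-- ===== PRECONDITION & SPEC =====
-- Pre_ excludes radius < 0, where both Pythons raise ValueError.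
def Pre_midpoint_circle_iter (radius : Int) (cx : Int) (cy : Int) : Prop := 0 ≤ radius
instance (radius : Int) (cx : Int) (cy : Int) : Decidable (Pre_midpoint_circle_iter radius cx cy) := by unfold Pre_midpoint_circle_iter; infer_instance
def pvWitness_midpoint_circle_iter : Int × Int × Int := (3, 0, 0)
def Spec_midpoint_circle_iter (radius : Int) (cx : Int) (cy : Int) (out : List (Int × Int)) : Prop := out = midpoint_circle_iter_alt radius cx cy
instance (radius : Int) (cx : Int) (cy : Int) (out : List (Int × Int)) : Decidable (Spec_midpoint_circle_iter radius cx cy out) := by unfold Spec_midpoint_circle_iter; infer_instance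

-- ===== CLAIM (what is proved, stated in full; the proofs are below) =====
def Claim_equal_midpoint_circle_iter : Prop := ∀ (radius : Int) (cx : Int) (cy : Int), Dom_midpoint_circle_iter radius cx cy → Pre_midpoint_circle_iter radius cx cy → Spec_midpoint_circle_iter radius cx cy (midpoint_circle_iter radius cx cy)

-- ===== LEMMAS AND PROOFS =====
theorem pvLoopA_eq_flatMap (cx cy x y d : Int) :
    pvLoopA cx cy x y d = (pvOctants x y d).flatMap (pvExpand cx cy) := by
  induction x, y, d using pvOctants.induct with
  | case1 x y d h ih1 ih2 =>
      rw [pvLoopA, pvOctants]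
      simp only [dif_pos h]
      split_ifs with hd <;> simp [List.flatMap_cons, pvExpand, ih1, ih2]
  | case2 x y d h =>
      rw [pvLoopA, pvOctants]
      simp [h]

-- ===== VERDICT (by name: the statement is the Claim_ definition above) =====
theorem midpoint_circle_iter_spec : Claim_equal_midpoint_circle_iter := by
  intro radius cx cy _ _
  unfold Spec_midpoint_circle_iter midpoint_circle_iter midpoint_circle_iter_alt
  split_ifs <;> simp [pvLoopA_eq_flatMap]
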